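-- pv_equiv track=rewrite | github.com/arendt9797/coding-test-practice | Python3/프로그래머스/1/160586. 대충 만든 자판/대충 만든 자판.py | solution
-- ===== SOURCE A (Python) =====
-- from collections import defaultdict
--
-- def solution(keymap, targets):
--     answer = []
--     index_dict = defaultdict(int)
--     for key in keymap:
--         for i, k in enumerate(key):
--             if k in index_dict:
--                 if index_dict[k] > i+1:
--                     index_dict[k] = i+1
--             else:
--                 index_dict[k] = i+1
--     for target in targets:
--         acc = 0
--         for t in target:
--             if t in index_dict:
--                 acc += index_dict[t]
--             else:
--                 acc = -1
--                 break
--         answer.append(acc)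
--     return answer
-- ===== SOURCE B (Python) =====
-- def first_pos(key, t):
--     for i, k in enumerate(key):
--         if k == t:
--             return i + 1
--     return None
--
-- def solution(keymap, targets):
--     answer = []
--     for target in targets:
--         acc = 0
--         for t in target:
--             best = None
--             for key in keymap:
--                 p = first_pos(key, t)
--                 if p is not None and (best is None or p < best):
--                     best = p
--             if best is None:
--                 acc = -1
--                 break
--             acc += best
--         answer.append(acc)
--     return answer
-- ===== Notes on version B (the rewrite author's own statement) =====
-- stated objective: simpler
-- what changed: Drops the precomputed char->min-position dict entirely: for each target character B scans the keymap live, taking the minimum of each key's first occurrence position, short-circuiting to -1 when no key contains the character.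
import Mathlib
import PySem

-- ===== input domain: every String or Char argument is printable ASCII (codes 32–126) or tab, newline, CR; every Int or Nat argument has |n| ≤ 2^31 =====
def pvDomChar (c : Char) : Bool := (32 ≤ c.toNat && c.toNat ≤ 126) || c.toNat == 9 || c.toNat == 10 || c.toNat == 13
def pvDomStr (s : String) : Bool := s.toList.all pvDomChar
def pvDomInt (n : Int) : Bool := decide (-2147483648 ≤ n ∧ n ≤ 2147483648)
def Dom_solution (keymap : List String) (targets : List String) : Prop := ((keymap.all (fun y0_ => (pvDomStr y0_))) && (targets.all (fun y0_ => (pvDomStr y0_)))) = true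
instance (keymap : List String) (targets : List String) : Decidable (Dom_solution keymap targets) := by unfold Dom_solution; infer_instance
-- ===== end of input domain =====

-- B drops A's precomputed char->min-position dict: each target character is resolved by a live scan
-- of the keymap taking the minimum first-occurrence position (objective: simpler).


-- ===== PORT A =====
-- one dict-update step for one (i, k) of enumerate(key): 'k in d' / 'd[k] > i+1' via get?
def innerStep (d : PySem.Dict Char Int) (ik : Int × Char) : PySem.Dict Char Int :=
  match d.get? ik.2 with
  | some v => if v > ik.1 + 1 then d.insert ik.2 (ik.1 + 1) else d
  | none => d.insert ik.2 (ik.1 + 1)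

-- the first loop of A: build index_dict
def buildDict (keymap : List String) : PySem.Dict Char Int :=
  keymap.foldl (fun d key => (PySem.List.enumerate key.toList).foldl innerStep d) PySem.Dict.empty

-- the inner 'for t in target' loop with its break
def targetAcc (d : PySem.Dict Char Int) : List Char → Int → Int
  | [], acc => acc
  | t :: rest, acc =>
    match d.get? t with
    | some v => targetAcc d rest (acc + v)
    | none => -1

def solution (keymap : List String) (targets : List String) : List Int :=
  let d := buildDict keymap
  targets.foldl (fun answer target => answer ++ [targetAcc d target.toList 0]) []

-- ===== PORT B =====
-- first_pos: 'for i, k in enumerate(key): if k == t: return i+1' as structural recursion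
def firstPosAux (t : Char) : List Char → Int → Option Int
  | [], _ => none
  | k :: rest, i => if k = t then some (i + 1) else firstPosAux t rest (i + 1)

def firstPos (key : String) (t : Char) : Option Int := firstPosAux t key.toList 0

-- the 'for key in keymap' live scan keeping the best position
def bestPos (keymap : List String) (t : Char) : Option Int :=
  keymap.foldl (fun best key =>
    match firstPos key t with
    | some p => match best with
                | none => some p
                | some b => if p < b then some p else some b
    | none => best) none

def altTargetAcc (keymap : List String) : List Char → Int → Int
  | [], acc => acc
  | t :: rest, acc =>
    match bestPos keymap t with
    | some p => altTargetAcc keymap rest (acc + p)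
    | none => -1

def solution_alt (keymap : List String) (targets : List String) : List Int :=
  targets.foldl (fun answer target => answer ++ [altTargetAcc keymap target.toList 0]) []

-- ===== PRECONDITION & SPEC =====
def Spec_solution (keymap : List String) (targets : List String) (out : List Int) : Prop := out = solution_alt keymap targets
instance (keymap : List String) (targets : List String) (out : List Int) : Decidable (Spec_solution keymap targets out) := by unfold Spec_solution; infer_instance

-- ===== CLAIM (what is proved, stated in full; the proofs are below) =====
def Claim_equal_solution : Prop := ∀ (keymap : List String) (targets : List String), Dom_solution keymap targets → Spec_solution keymap targets (solution keymap targets)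

-- ===== LEMMAS AND PROOFS =====

-- option-level minimum combining an accumulated best with a key's first position
def minOpt (a b : Option Int) : Option Int :=
  match a, b with
  | none, b => b
  | some x, none => some x
  | some x, some y => some (min x y)

theorem firstPosAux_ge (t : Char) (cs : List Char) (i : Int) (p : Int)
    (h : firstPosAux t cs i = some p) : i + 1 ≤ p := by
  induction cs generalizing i with
  | nil => simp [firstPosAux] at h
  | cons k rest ih =>
    simp only [firstPosAux] at h
    split at h
    · simp at h; omega
    · exact le_trans (by omega) (ih (i + 1) h)

-- one key's worth of A's dict updates, at lookup t, is a minOpt with the key's first position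
theorem inner_get (t : Char) (cs : List Char) (i : Int) (d : PySem.Dict Char Int) :
    ((PySem.List.enumerate cs i).foldl innerStep d).get? t
      = minOpt (d.get? t) (firstPosAux t cs i) := by
  induction cs generalizing i d with
  | nil => simp [PySem.List.enumerate, firstPosAux]; cases d.get? t <;> simp [minOpt]
  | cons k rest ih =>
    rw [PySem.List.enumerate_cons]
    simp only [List.foldl_cons, firstPosAux]
    rw [ih]
    by_cases hk : k = t
    · subst hk
      have hstep : (innerStep d (i, k)).get? k = minOpt (d.get? k) (some (i + 1)) := by
        simp only [innerStep]
        cases hd : d.get? k with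
        | none => simp [minOpt, PySem.Dict.get?_insert_self]
        | some v =>
          simp only [minOpt]
          split_ifs with h
          · simp [PySem.Dict.get?_insert_self]; omega
          · simp [hd]; omega
      rw [hstep, if_pos rfl]
      cases hr : firstPosAux k rest (i + 1) with
      | none => cases d.get? k <;> simp [minOpt]
      | some p =>
        have hp := firstPosAux_ge k rest (i + 1) p hr
        cases d.get? k <;> simp [minOpt] <;> omega
    · have hstep : (innerStep d (i, k)).get? t = d.get? t := by
        simp only [innerStep]
        cases d.get? k
        · simp [PySem.Dict.get?_insert_of_ne _ _ (fun h => hk h.symm)]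
        · dsimp only
          split_ifs <;> simp [PySem.Dict.get?_insert_of_ne _ _ (fun h => hk h.symm)]
      rw [hstep, if_neg hk]

-- A's whole dict, at lookup t, is the fold of minOpt over keys' first positions
theorem build_get (t : Char) (keymap : List String) (d : PySem.Dict Char Int) :
    (keymap.foldl (fun d key => (PySem.List.enumerate key.toList).foldl innerStep d) d).get? t
      = keymap.foldl (fun b key => minOpt b (firstPos key t)) (d.get? t) := by
  induction keymap generalizing d with
  | nil => rfl
  | cons key rest ih =>
    simp only [List.foldl_cons]
    rw [ih, inner_get]
    rfl

-- B's step function is exactly minOpt with the key's first position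
theorem bestPos_eq_fold (keymap : List String) (t : Char) :
    bestPos keymap t = keymap.foldl (fun b key => minOpt b (firstPos key t)) none := by
  unfold bestPos
  congr 1
  funext b key
  cases firstPos key t <;> cases b <;> (try rfl) <;> simp [minOpt, min_def] <;> split_ifs <;> (try rfl) <;> omega

theorem dict_eq_bestPos (keymap : List String) (t : Char) :
    (buildDict keymap).get? t = bestPos keymap t := by
  rw [buildDict, build_get, bestPos_eq_fold, PySem.Dict.get?_empty]

theorem targetAcc_eq (keymap : List String) (cs : List Char) (acc : Int) :
    targetAcc (buildDict keymap) cs acc = altTargetAcc keymap cs acc := by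
  induction cs generalizing acc with
  | nil => rfl
  | cons t rest ih =>
    simp only [targetAcc, altTargetAcc, dict_eq_bestPos]
    cases bestPos keymap t <;> simp [ih]

-- ===== VERDICT (by name: the statement is the Claim_ definition above) =====
theorem solution_spec : Claim_equal_solution := by
  intro keymap targets _
  unfold Spec_solution solution solution_alt
  simp only [targetAcc_eq]
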